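-- pv_equiv track=rewrite | github.com/walisson-silva-ada/listas-e-for-exercicios-vd | extencao_py/funcoes_exercicio_20.py | ganhador
-- ===== SOURCE A (Python) =====
-- def ganhador(j):
--     aux = 0
--     camp = ""
--     for x in j:
--         if x[1] > aux and x[1] <= 21:
--             aux = x[1]
--             camp = x[0]
--     return camp
-- ===== SOURCE B (Python) =====
-- def ganhador(j):
--     # Sort players by score descending (stable), then return the first with a
--     # valid blackjack score (0 < s <= 21); stability preserves A's first-wins ties.
--     for nome, pontos in sorted(j, key=lambda x: x[1], reverse=True):
--         if 0 < pontos <= 21: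
--             return nome
--     return ""
-- ===== Notes on version B (the rewrite author's own statement) =====
-- stated objective: alternative
-- what changed: Replaces A's single accumulator scan with sort-then-scan: stably sort players by score descending, then return the first with 0 < score <= 21 (stability of Python's sort preserves A's first-wins tie rule).
import Mathlib
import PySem

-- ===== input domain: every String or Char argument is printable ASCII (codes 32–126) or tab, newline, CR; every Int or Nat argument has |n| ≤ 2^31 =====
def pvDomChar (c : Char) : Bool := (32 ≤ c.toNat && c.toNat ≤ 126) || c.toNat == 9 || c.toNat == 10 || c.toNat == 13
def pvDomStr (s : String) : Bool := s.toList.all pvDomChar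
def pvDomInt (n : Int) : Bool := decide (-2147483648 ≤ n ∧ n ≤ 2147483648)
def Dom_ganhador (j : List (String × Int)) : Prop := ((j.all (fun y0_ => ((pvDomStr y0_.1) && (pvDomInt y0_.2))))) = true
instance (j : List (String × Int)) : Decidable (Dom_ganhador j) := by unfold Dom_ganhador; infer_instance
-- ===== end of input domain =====

-- B replaces A's single accumulator scan with sort-then-scan: stably sort by score descending,
-- then return the first name with 0 < score ≤ 21 (stability preserves A's first-wins ties).


-- ===== PORT A =====
-- state (aux, camp); for x in j: if x[1] > aux and x[1] <= 21: aux, camp = x[1], x[0]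
def ganhador (j : List (String × Int)) : String :=
  (j.foldl (fun s x => if x.2 > s.1 ∧ x.2 ≤ 21 then (x.2, x.1) else s) ((0 : Int), "")).2

-- ===== PORT B =====
-- the for-loop with early return over the sorted list
def ganhadorScan : List (String × Int) → String
  | [] => ""
  | x :: t => if 0 < x.2 ∧ x.2 ≤ 21 then x.1 else ganhadorScan t

-- sorted(j, key=lambda x: x[1], reverse=True), then scan for the first valid score
def ganhador_alt (j : List (String × Int)) : String :=
  ganhadorScan (PySem.List.sorted j (fun x => x.2) true)

-- ===== PRECONDITION & SPEC =====
def Spec_ganhador (j : List (String × Int)) (out : String) : Prop := out = ganhador_alt j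
instance (j : List (String × Int)) (out : String) : Decidable (Spec_ganhador j out) := by unfold Spec_ganhador; infer_instance

-- ===== CLAIM (what is proved, stated in full; the proofs are below) =====
def Claim_equal_ganhador : Prop := ∀ (j : List (String × Int)), Dom_ganhador j → Spec_ganhador j (ganhador j)

-- ===== LEMMAS AND PROOFS =====

-- a valid blackjack score
def pvP (x : String × Int) : Bool := decide (0 < x.2 ∧ x.2 ≤ 21)

-- A's loop step
def pvStep (s : Int × String) (x : String × Int) : Int × String :=
  if x.2 > s.1 ∧ x.2 ≤ 21 then (x.2, x.1) else s

-- insertion step of the reverse-stable sort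
def pvIns (acc : List (String × Int)) (x : String × Int) : List (String × Int) :=
  PySem.List.insertBy (fun a b => decide (b.2 < a.2)) x acc

-- A's state as read off the sorted accumulator
def pvRepr (acc : List (String × Int)) : Int × String :=
  match acc.find? pvP with
  | none => ((0 : Int), "")
  | some m => (m.2, m.1)

lemma pvScan_eq_find (l : List (String × Int)) :
    ganhadorScan l = (match l.find? pvP with | none => "" | some m => m.1) := by
  induction l with
  | nil => rfl
  | cons x t ih =>
    by_cases h : 0 < x.2 ∧ x.2 ≤ 21
    · simp [ganhadorScan, pvP, h]
    · simp [ganhadorScan, pvP, h, ih]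

lemma pvIns_pairwise (x : String × Int) (acc : List (String × Int))
    (hd : acc.Pairwise (fun a b => b.2 ≤ a.2)) :
    (pvIns acc x).Pairwise (fun a b => b.2 ≤ a.2) := by
  induction acc with
  | nil => simp [pvIns, PySem.List.insertBy]
  | cons y t ih =>
    rw [List.pairwise_cons] at hd
    by_cases hlt : y.2 < x.2
    · have : pvIns (y :: t) x = x :: y :: t := by
        simp [pvIns, PySem.List.insertBy, hlt]
      rw [this, List.pairwise_cons]
      refine ⟨?_, List.pairwise_cons.mpr hd⟩
      intro z hz
      rcases List.mem_cons.mp hz with hz | hz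
      · subst hz; omega
      · have := hd.1 z hz; omega
    · have : pvIns (y :: t) x = y :: pvIns t x := by
        simp [pvIns, PySem.List.insertBy, hlt]
      rw [this, List.pairwise_cons]
      refine ⟨?_, ih hd.2⟩
      intro z hz
      rcases (PySem.List.mem_insertBy _ _ _ _).mp hz with hz | hz
      · subst hz; omega
      · exact hd.1 z hz

lemma pvIns_find (x : String × Int) (acc : List (String × Int))
    (hd : acc.Pairwise (fun a b => b.2 ≤ a.2)) :
    (pvIns acc x).find? pvP
      = (match acc.find? pvP with
         | none => if pvP x then some x else none
         | some m => if pvP x && decide (m.2 < x.2) then some x else some m) := by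
  induction acc with
  | nil =>
    cases hP : pvP x <;> simp [pvIns, PySem.List.insertBy, hP]
  | cons y t ih =>
    rw [List.pairwise_cons] at hd
    by_cases hlt : y.2 < x.2
    · have hins : pvIns (y :: t) x = x :: y :: t := by
        simp [pvIns, PySem.List.insertBy, hlt]
      rw [hins]
      cases hf : (y :: t).find? pvP with
      | none =>
        cases hP : pvP x <;> simp [hP, hf]
      | some m =>
        have hm : m ∈ y :: t := List.mem_of_find?_eq_some hf
        have hm2 : m.2 < x.2 := by
          rcases List.mem_cons.mp hm with hm | hm
          · subst hm; exact hlt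
          · have := hd.1 m hm; omega
        cases hP : pvP x <;> simp [hP, hf, hm2]
    · have hins : pvIns (y :: t) x = y :: pvIns t x := by
        simp [pvIns, PySem.List.insertBy, hlt]
      rw [hins]
      cases hPy : pvP y with
      | true =>
        have : ¬ (y.2 < x.2) := hlt
        simp [hPy, this]
      | false =>
        simp [hPy, ih hd.2]

lemma pvStep_repr (x : String × Int) (acc : List (String × Int))
    (hd : acc.Pairwise (fun a b => b.2 ≤ a.2)) :
    pvStep (pvRepr acc) x = pvRepr (pvIns acc x) := by
  unfold pvRepr
  rw [pvIns_find x acc hd]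
  cases hf : acc.find? pvP with
  | none =>
    by_cases hP : 0 < x.2 ∧ x.2 ≤ 21
    · have : pvP x = true := by simp [pvP, hP]
      simp [pvStep, this, hP.1, hP.2]
    · have : pvP x = false := by simp [pvP]; omega
      simp only [this]
      have : ¬ (x.2 > (0 : Int) ∧ x.2 ≤ 21) := by omega
      simp [pvStep, this]
  | some m =>
    have hPm : pvP m = true := List.find?_some hf
    have hm : 0 < m.2 ∧ m.2 ≤ 21 := by simpa [pvP] using hPm
    by_cases hc : x.2 > m.2 ∧ x.2 ≤ 21
    · have h1 : pvP x = true := by simp [pvP]; omega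
      have h2 : m.2 < x.2 := hc.1
      simp [pvStep, hc, h1]
    · have : (pvP x && decide (m.2 < x.2)) = false := by
        simp [pvP]; omega
      simp [pvStep, hc, this]

lemma pvLoop (j : List (String × Int)) :
    ∀ acc : List (String × Int), acc.Pairwise (fun a b => b.2 ≤ a.2) →
    j.foldl pvStep (pvRepr acc)
      = pvRepr (j.foldl (fun acc x => pvIns acc x) acc) := by
  induction j with
  | nil => intro acc _; rfl
  | cons x t ih =>
    intro acc hd
    rw [List.foldl_cons, List.foldl_cons, pvStep_repr x acc hd]
    exact ih (pvIns acc x) (pvIns_pairwise x acc hd)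

-- ===== VERDICT (by name: the statement is the Claim_ definition above) =====
theorem ganhador_spec : Claim_equal_ganhador := by
  intro j _
  show ganhador j = ganhador_alt j
  unfold ganhador ganhador_alt
  rw [PySem.List.sorted_rev_eq_foldl_insertBy, pvScan_eq_find]
  have h := pvLoop j [] List.Pairwise.nil
  have hrepr : pvRepr ([] : List (String × Int)) = ((0 : Int), "") := rfl
  rw [hrepr] at h
  have hstep : (fun (s : Int × String) (x : String × Int) =>
      if x.2 > s.1 ∧ x.2 ≤ 21 then (x.2, x.1) else s) = pvStep := rfl
  have hins : (fun (acc : List (String × Int)) (x : String × Int) =>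
      PySem.List.insertBy (fun a b => decide (b.2 < a.2)) x acc)
      = fun acc x => pvIns acc x := rfl
  rw [hstep, hins, h]
  unfold pvRepr
  cases (List.foldl (fun acc x => pvIns acc x) [] j).find? pvP <;> rfl
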